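-- pv_equiv track=rewrite | github.com/goodcrypto/goodcrypto-mail | goodcrypto/oce/utils.py | format_fingerprint
-- ===== SOURCE A (Python) =====
-- def format_fingerprint(fingerprint):
--     '''
--         Format a fingerprint so it's more readable.
--
--         >>> format_fingerprint('D1063C249F55FFE30DC780DFD90F18808F6CCF14')
--         'D106 3C24 9F55 FFE3 0DC7 80DF D90F 1880 8F6C CF14'
--         >>> format_fingerprint('')
--         ''
--         >>> format_fingerprint(None)
--     '''
--
--     if fingerprint is None or len(fingerprint.strip()) <= 0:
--         formatted_fingerprint = fingerprint
--     else:
--         if fingerprint.strip().find(' ') <= 0: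
--             cluster = ''
--             formatted_fingerprint = ''
--             for letter in fingerprint:
--                 cluster += letter
--                 if len(cluster) % 4 == 0:
--                     cluster += ' '
--                     formatted_fingerprint += cluster
--                     cluster = ''
--             formatted_fingerprint = formatted_fingerprint.strip()
--         else:
--             formatted_fingerprint = fingerprint
--
--     return formatted_fingerprint
-- ===== SOURCE B (Python) =====
-- def format_fingerprint(fingerprint):
--     ''' Format a fingerprint into space-separated 4-char groups (idiomatic chunked slicing). '''
--     if fingerprint is None or not fingerprint.strip():
--         return fingerprint
--     if ' ' in fingerprint.strip():
--         return fingerprint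
--     n = len(fingerprint)
--     chunks = [fingerprint[i:i + 4] for i in range(0, n - n % 4, 4)]
--     return ' '.join(chunks).strip()
-- ===== Notes on version B (the rewrite author's own statement) =====
-- stated objective: idiomatic
-- what changed: Replaces the char-by-char accumulator with mod-4 bookkeeping by chunked slicing: slice the string into 4-char windows with range(0, n - n % 4, 4) and join them with single spaces (the bound drops the trailing partial group exactly as A does).
import Mathlib
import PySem

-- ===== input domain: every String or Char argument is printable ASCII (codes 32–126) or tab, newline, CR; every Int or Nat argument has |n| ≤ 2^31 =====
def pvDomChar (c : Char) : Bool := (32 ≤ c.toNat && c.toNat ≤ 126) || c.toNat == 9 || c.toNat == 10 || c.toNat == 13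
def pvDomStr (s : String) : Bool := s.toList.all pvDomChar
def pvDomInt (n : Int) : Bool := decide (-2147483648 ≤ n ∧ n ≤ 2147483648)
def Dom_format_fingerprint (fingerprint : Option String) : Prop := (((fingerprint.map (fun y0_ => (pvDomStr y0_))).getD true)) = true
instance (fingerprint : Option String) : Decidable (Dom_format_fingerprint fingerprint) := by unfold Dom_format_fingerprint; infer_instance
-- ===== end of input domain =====

-- B replaces A's char-by-char accumulator loop with chunked slicing joined by spaces (idiomatic decomposition, same cost).


-- ===== PORT A =====
-- loop body of A: cluster += letter; if len(cluster) % 4 == 0: cluster += ' '; formatted += cluster; cluster = ''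
def stepA (st : List Char × List Char) (letter : Char) : List Char × List Char :=
  let cluster := st.1 ++ [letter]
  if cluster.length % 4 = 0 then ([], st.2 ++ (cluster ++ [' ']))
  else (cluster, st.2)

def format_fingerprint (fingerprint : Option String) : Option String :=
  match fingerprint with
  | none => none
  | some fp =>
    if PySem.Chars.len (PySem.Chars.strip fp.toList) ≤ 0 then some fp
    else if PySem.Chars.find (PySem.Chars.strip fp.toList) [' '] ≤ 0 then
      -- for letter in fingerprint: cluster += letter; if len(cluster)%4==0: cluster += ' '; formatted += cluster; cluster = ''
      let r := fp.toList.foldl stepA ([], [])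
      some (String.ofList (PySem.Chars.strip r.2))
    else some fp

-- ===== PORT B =====
def format_fingerprint_alt (fingerprint : Option String) : Option String :=
  match fingerprint with
  | none => none
  | some fp =>
    if PySem.Chars.strip fp.toList = [] then some fp
    else if PySem.Chars.isIn [' '] (PySem.Chars.strip fp.toList) then some fp
    else
      let cs := fp.toList
      let n : Int := PySem.Chars.len cs
      let chunks := (PySem.List.pyRange 0 (n - PySem.Int.mod n 4) 4).map
        (fun i => PySem.List.slice cs (some i) (some (i + 4)))
      some (String.ofList (PySem.Chars.strip (PySem.Chars.join [' '] chunks)))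

-- ===== PRECONDITION & SPEC =====
def Spec_format_fingerprint (fingerprint : Option String) (out : Option String) : Prop := out = format_fingerprint_alt fingerprint
instance (fingerprint : Option String) (out : Option String) : Decidable (Spec_format_fingerprint fingerprint out) := by unfold Spec_format_fingerprint; infer_instance

-- ===== CLAIM (what is proved, stated in full; the proofs are below) =====
def Claim_equal_format_fingerprint : Prop := ∀ (fingerprint : Option String), Dom_format_fingerprint fingerprint → Spec_format_fingerprint fingerprint (format_fingerprint fingerprint)

-- ===== LEMMAS AND PROOFS =====

-- the full 4-char groups of cs, in order
def chunksOf4 : List Char → List (List Char)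
  | a :: b :: c :: d :: r => [a, b, c, d] :: chunksOf4 r
  | _ => []

-- what A's loop produces before the final strip: each full group followed by a space
def groups4 : List Char → List Char
  | a :: b :: c :: d :: r => a :: b :: c :: d :: ' ' :: groups4 r
  | _ => []

-- the leftover partial group A's loop holds at the end (dropped)
def rem4 : List Char → List Char
  | _ :: _ :: _ :: _ :: r => rem4 r
  | x => x

lemma foldA_eq (cs : List Char) : ∀ acc : List Char,
    cs.foldl stepA ([], acc) = (rem4 cs, acc ++ groups4 cs) := by
  induction cs using chunksOf4.induct with
  | case1 a b c d r ih =>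
      intro acc
      show List.foldl stepA ([], acc) ([a, b, c, d] ++ r) = _
      rw [List.foldl_append]
      have h4 : List.foldl stepA ([], acc) [a, b, c, d] = ([], acc ++ [a, b, c, d, ' ']) := by
        simp [List.foldl, stepA]
      rw [h4, ih]
      simp [groups4, rem4]
  | case2 x h =>
      intro acc
      match x, h with
      | [], _ => simp [List.foldl, groups4, rem4]
      | [a], _ => simp [List.foldl, stepA, groups4, rem4]
      | [a, b], _ => simp [List.foldl, stepA, groups4, rem4]
      | [a, b, c], _ => simp [List.foldl, stepA, groups4, rem4]
      | a :: b :: c :: d :: r, h => exact absurd rfl (h a b c d r)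

lemma chunks_range_eq (cs : List Char) :
    (List.range (cs.length / 4)).map (fun k => (cs.drop (4 * k)).take 4) = chunksOf4 cs := by
  induction cs using chunksOf4.induct with
  | case1 a b c d r ih =>
      have hlen : (a :: b :: c :: d :: r).length / 4 = r.length / 4 + 1 := by
        simp [List.length]; omega
      rw [hlen, List.range_succ_eq_map, List.map_cons, List.map_map]
      simp only [chunksOf4]
      refine List.cons_eq_cons.mpr ⟨by simp, ?_⟩
      rw [← ih]
      apply List.map_congr_left
      intro k _
      simp only [Function.comp_apply]
      congr 1
  | case2 x h =>
      match x, h with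
      | [], _ => simp [chunksOf4]
      | [a], _ => simp [chunksOf4]
      | [a, b], _ => simp [chunksOf4]
      | [a, b, c], _ => simp [chunksOf4]
      | a :: b :: c :: d :: r, h => exact absurd rfl (h a b c d r)

lemma chunksB_eq (cs : List Char) :
    (PySem.List.pyRange 0 ((PySem.Chars.len cs) - PySem.Int.mod (PySem.Chars.len cs) 4) 4).map
      (fun i => PySem.List.slice cs (some i) (some (i + 4))) = chunksOf4 cs := by
  have hlen : PySem.Chars.len cs = (cs.length : Int) := by simp [PySem.Chars.len_eq]
  have hmod : PySem.Int.mod (cs.length : Int) 4 = ((cs.length % 4 : Nat) : Int) := by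
    simp only [PySem.Int.mod]
    rw [Int.fmod_eq_emod]
    simp
  rw [hlen, hmod]
  have hsub : ((cs.length : Int) - ((cs.length % 4 : Nat) : Int)) = ((cs.length - cs.length % 4 : Nat) : Int) := by
    have := Nat.mod_le cs.length 4; omega
  rw [hsub]
  rw [PySem.List.pyRange_of_pos 0 _ (by norm_num)]
  rw [List.map_map]
  set m : Nat := cs.length - cs.length % 4 with hm
  have hm4 : m % 4 = 0 := by omega
  have hcount : (if (0:Int) < (m : Int) then ((((m:Int) - 0 + 4 - 1) / 4)).toNat else 0) = m / 4 := by
    by_cases h0 : 0 < m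
    · rw [if_pos (by exact_mod_cast h0)]
      have : ((m:Int) - 0 + 4 - 1) / 4 = ((m + 3 : Nat) : Int) / 4 := by norm_num; congr 1; omega
      rw [this]
      rw [show ((m + 3 : Nat) : Int) / 4 = (((m + 3) / 4 : Nat) : Int) by exact_mod_cast rfl]
      simp; omega
    · rw [if_neg (by omega)]; omega
  rw [hcount]
  have hdiv : m / 4 = cs.length / 4 := by omega
  rw [hdiv, ← chunks_range_eq cs]
  apply List.map_congr_left
  intro k _
  show PySem.List.slice cs (some (0 + 4 * (k : Int))) (some (0 + 4 * (k : Int) + 4)) = _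
  have h1 : (0 + 4 * (k : Int)) = ((4 * k : Nat) : Int) := by push_cast; ring
  rw [h1]
  rw [show ((4 * k : Nat) : Int) + 4 = ((4 * k : Nat) : Int) + ((4 : Nat) : Int) by norm_num]
  rw [PySem.List.slice_natCast_add]

lemma chunksOf4_nil_iff (cs : List Char) : chunksOf4 cs = [] ↔ groups4 cs = [] := by
  induction cs using chunksOf4.induct with
  | case1 a b c d r ih => simp [chunksOf4, groups4]
  | case2 x h =>
      match x, h with
      | [], _ => simp [chunksOf4, groups4]
      | [a], _ => simp [chunksOf4, groups4]
      | [a, b], _ => simp [chunksOf4, groups4]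
      | [a, b, c], _ => simp [chunksOf4, groups4]
      | a :: b :: c :: d :: r, h => exact absurd rfl (h a b c d r)

lemma groups4_join (cs : List Char) :
    (chunksOf4 cs = [] ∧ groups4 cs = []) ∨
      groups4 cs = PySem.Chars.join [' '] (chunksOf4 cs) ++ [' '] := by
  induction cs using chunksOf4.induct with
  | case1 a b c d r ih =>
      right
      by_cases hcr : chunksOf4 r = []
      · have hgr : groups4 r = [] := (chunksOf4_nil_iff r).mp hcr
        simp [chunksOf4, groups4, hcr, hgr, PySem.Chars.join_singleton]
      · rcases ih with ⟨h1, _⟩ | h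
        · exact absurd h1 hcr
        · match hcr2 : chunksOf4 r, hcr with
          | c2 :: rest, _ =>
            rw [hcr2] at h
            simp only [chunksOf4, groups4, hcr2]
            rw [PySem.Chars.join_cons_cons, h]
            simp
  | case2 x h =>
      match x, h with
      | [], _ => left; simp [chunksOf4, groups4]
      | [a], _ => left; simp [chunksOf4, groups4]
      | [a, b], _ => left; simp [chunksOf4, groups4]
      | [a, b, c], _ => left; simp [chunksOf4, groups4]
      | a :: b :: c :: d :: r, h => exact absurd rfl (h a b c d r)

lemma rstrip_append_space (x : List Char) :
    PySem.Chars.rstrip (x ++ [' ']) = PySem.Chars.rstrip x := by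
  simp [PySem.Chars.rstrip, PySem.Chars.isspace]

lemma strip_append_space (x : List Char) :
    PySem.Chars.strip (x ++ [' ']) = PySem.Chars.strip x := by
  simp only [PySem.Chars.strip, PySem.Chars.lstrip]
  rw [List.dropWhile_append]
  by_cases h : (List.dropWhile PySem.Chars.isspace x).isEmpty
  · rw [if_pos h]
    rw [List.isEmpty_iff] at h
    rw [h]
    simp [List.dropWhile, PySem.Chars.isspace, PySem.Chars.rstrip]
  · rw [if_neg h]
    exact rstrip_append_space _

lemma strip_groups4_eq (cs : List Char) :
    PySem.Chars.strip (groups4 cs) =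
      PySem.Chars.strip (PySem.Chars.join [' '] (chunksOf4 cs)) := by
  rcases groups4_join cs with ⟨h1, h2⟩ | h
  · rw [h1, h2]; simp [PySem.Chars.join, List.intercalate]
  · rw [h, strip_append_space]

-- the first char of a stripped string is not whitespace
lemma strip_head_not_space (s : List Char) (c : Char) (t : List Char)
    (h : PySem.Chars.strip s = c :: t) : PySem.Chars.isspace c = false := by
  have hpre : PySem.Chars.rstrip (PySem.Chars.lstrip s) <+: PySem.Chars.lstrip s := by
    simp only [PySem.Chars.rstrip]
    obtain ⟨u, hu⟩ :=
      List.dropWhile_suffix (l := (PySem.Chars.lstrip s).reverse) PySem.Chars.isspace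
    exact ⟨u.reverse, by rw [← List.reverse_append, hu, List.reverse_reverse]⟩
  rw [PySem.Chars.strip] at h
  rw [h] at hpre
  obtain ⟨u, hu⟩ := hpre
  have ht' : PySem.Chars.lstrip s = c :: (t ++ u) := by rw [← hu]; simp
  simp only [PySem.Chars.lstrip] at ht'
  have := List.head?_dropWhile_not PySem.Chars.isspace s
  rw [ht'] at this
  simpa using this

lemma find_le_zero_iff (s : List Char) (c : Char) (t : List Char)
    (h : PySem.Chars.strip s = c :: t) :
    (PySem.Chars.find (PySem.Chars.strip s) [' '] ≤ 0 ↔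
      PySem.Chars.isIn [' '] (PySem.Chars.strip s) = false) := by
  constructor
  · intro hle
    rw [PySem.Chars.isIn_eq_false_iff]
    intro hinf
    have hnn : 0 ≤ PySem.Chars.find (PySem.Chars.strip s) [' '] :=
      (PySem.Chars.find_nonneg_iff _ _).mpr hinf
    have h0 : PySem.Chars.find (PySem.Chars.strip s) [' '] = 0 := le_antisymm hle hnn
    have hspec := (PySem.Chars.find_spec (s := PySem.Chars.strip s) (sub := [' ']) (by omega)).1
    rw [h0] at hspec
    simp only [Int.toNat_zero, List.drop_zero] at hspec
    obtain ⟨u, hu⟩ := hspec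
    rw [h] at hu
    have hc : c = ' ' := by
      have := congrArg (·.head?) hu
      simpa using this.symm
    have := strip_head_not_space s c t h
    rw [hc] at this
    simp [PySem.Chars.isspace] at this
  · intro hni
    have : PySem.Chars.find (PySem.Chars.strip s) [' '] = -1 := by
      rw [PySem.Chars.find_eq_neg_one_iff]
      exact (PySem.Chars.isIn_eq_false_iff _ _).mp hni
    omega

-- ===== VERDICT (by name: the statement is the Claim_ definition above) =====
theorem format_fingerprint_spec : Claim_equal_format_fingerprint := by
  intro fingerprint _
  unfold Spec_format_fingerprint
  match fingerprint with
  | none => rfl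
  | some fp =>
    simp only [format_fingerprint, format_fingerprint_alt]
    by_cases hempty : PySem.Chars.strip fp.toList = []
    · rw [if_pos hempty, if_pos (by simp [PySem.Chars.len_eq, hempty])]
    · rw [if_neg hempty]
      obtain ⟨c, t, hst⟩ := List.exists_cons_of_ne_nil hempty
      have hlen : ¬ PySem.Chars.len (PySem.Chars.strip fp.toList) ≤ 0 := by
        rw [hst]
        simp [PySem.Chars.len_eq]
      rw [if_neg hlen]
      by_cases hin : PySem.Chars.isIn [' '] (PySem.Chars.strip fp.toList) = true
      · have hfind : ¬ PySem.Chars.find (PySem.Chars.strip fp.toList) [' '] ≤ 0 := by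
          intro hle
          have := (find_le_zero_iff fp.toList c t hst).mp hle
          rw [this] at hin
          simp at hin
        rw [if_neg hfind, if_pos hin]
      · have hin' : PySem.Chars.isIn [' '] (PySem.Chars.strip fp.toList) = false := by
          simpa using hin
        have hfind : PySem.Chars.find (PySem.Chars.strip fp.toList) [' '] ≤ 0 :=
          (find_le_zero_iff fp.toList c t hst).mpr hin'
        rw [if_pos hfind, if_neg hin]
        rw [foldA_eq fp.toList []]
        rw [chunksB_eq fp.toList]
        rw [List.nil_append, strip_groups4_eq]
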